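-- pv_equiv track=rewrite | github.com/khloe1425/luyenthihsgioi | THCS/2023_2024/QuynhLuu_2324/Bai3/Sortx.py | sort_strings
-- ===== SOURCE A (Python) =====
-- def sort_strings(strings):
--     # Tách các chuỗi số và chuỗi không phải số
--     numeric_strings = [s for s in strings if s.isdigit()]
--     non_numeric_strings = [s for s in strings if not s.isdigit()]
--
--     # Sắp xếp các chuỗi số
--     numeric_strings.sort(key=int)
--
--     # Kết hợp lại danh sách theo thứ tự ban đầu
--     result = []
--     num_index = 0
--     for s in strings:
--         if s.isdigit():
--             result.append(numeric_strings[num_index])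
--             num_index += 1
--         else:
--             result.append(s)
--
--     return result
-- ===== SOURCE B (Python) =====
-- def sort_strings(strings):
--     # Selection instead of sorting: at each digit slot, extract the numerically
--     # smallest string still remaining in the pool of digit strings.
--     pool = [s for s in strings if s.isdigit()]
--     result = []
--     for s in strings:
--         if s.isdigit():
--             smallest = min(pool, key=int)
--             pool.remove(smallest)
--             result.append(smallest)
--         else:
--             result.append(s)
--     return result
-- ===== Notes on version B (the rewrite author's own statement) =====
-- stated objective: alternative
-- what changed: B performs no sort at all: it walks the input once and at each digit slot extracts the numerically smallest remaining digit string via min(key=int)/remove (stable selection), instead of A's partition + library sort + counter-driven reinsertion.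
import Mathlib
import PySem

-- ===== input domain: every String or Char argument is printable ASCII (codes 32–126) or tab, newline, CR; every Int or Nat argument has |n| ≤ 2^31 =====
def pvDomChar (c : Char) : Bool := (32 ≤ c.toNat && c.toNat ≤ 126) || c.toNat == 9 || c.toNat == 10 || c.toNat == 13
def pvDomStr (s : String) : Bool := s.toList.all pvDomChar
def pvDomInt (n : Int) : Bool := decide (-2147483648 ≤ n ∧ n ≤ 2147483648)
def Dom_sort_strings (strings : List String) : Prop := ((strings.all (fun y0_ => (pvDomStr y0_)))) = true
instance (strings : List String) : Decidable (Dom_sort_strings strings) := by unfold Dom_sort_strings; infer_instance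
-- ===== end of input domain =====

-- B performs no sort: one pass over the input, extracting at each digit slot the numerically
-- smallest remaining digit string by min(key=int)/remove (objective: alternative algorithm).

-- ===== PORT A =====
def sort_strings (strings : List String) : List String :=
  let numeric_strings := strings.filter (fun s => PySem.Str.strIsdigit s)
  let _non_numeric_strings := strings.filter (fun s => !(PySem.Str.strIsdigit s))
  -- key=int: on the strings this key is applied to, s.isdigit() holds, so int(s) never raises;
  -- 'getD 0' is never the none branch there
  let numeric_sorted := PySem.List.sorted numeric_strings (fun s => (PySem.Int.ofStr? s).getD 0)
  let res := strings.foldl (fun st s =>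
      if PySem.Str.strIsdigit s then
        (st.1 ++ [(PySem.List.pyGet? numeric_sorted st.2).getD ""], st.2 + 1)
      else
        (st.1 ++ [s], st.2)) (([] : List String), (0 : Int))
  res.1

-- ===== PORT B =====
def sort_strings_alt (strings : List String) : List String :=
  let pool0 := strings.filter (fun s => PySem.Str.strIsdigit s)
  -- min(pool, key=int) / pool.remove: the pool is nonempty at every digit slot, so min
  -- never raises (ValueError) and remove always finds its element; the 'none' fallbacks
  -- below are unreachable
  let res := strings.foldl (fun st s =>
      if PySem.Str.strIsdigit s then
        match PySem.List.min? st.2 (fun t => (PySem.Int.ofStr? t).getD 0) with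
        | some m => (st.1 ++ [m], (PySem.List.remove? st.2 m).getD st.2)
        | none => (st.1 ++ [s], st.2)
      else
        (st.1 ++ [s], st.2)) (([] : List String), pool0)
  res.1

-- ===== PRECONDITION & SPEC =====
def Spec_sort_strings (strings : List String) (out : List String) : Prop := out = sort_strings_alt strings
instance (strings : List String) (out : List String) : Decidable (Spec_sort_strings strings out) := by unfold Spec_sort_strings; infer_instance

-- ===== CLAIM (what is proved, stated in full; the proofs are below) =====
def Claim_equal_sort_strings : Prop := ∀ (strings : List String), Dom_sort_strings strings → Spec_sort_strings strings (sort_strings strings)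

-- ===== LEMMAS AND PROOFS =====

/-- Common shape: walk the input; at each digit string take the next value from `vs`. -/
def pvMerge : List String → List String → List String
  | [], _ => []
  | s :: ss, vs =>
    if PySem.Str.strIsdigit s then (vs.head?.getD "") :: pvMerge ss vs.tail
    else s :: pvMerge ss vs

/-- A's reconstruction loop reads `ns` sequentially: it is `pvMerge`. -/
lemma pvFoldA (ns : List String) (ss : List String) :
    ∀ (n : Nat) (acc : List String),
      (ss.foldl (fun st s =>
          if PySem.Str.strIsdigit s then
            (st.1 ++ [(PySem.List.pyGet? ns st.2).getD ""], st.2 + 1)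
          else
            (st.1 ++ [s], st.2)) (acc, (n : Int))).1
        = acc ++ pvMerge ss (ns.drop n) := by
  induction ss with
  | nil => intro n acc; simp [pvMerge]
  | cons s ss ih =>
    intro n acc
    by_cases hd : PySem.Str.strIsdigit s
    · rw [List.foldl_cons, if_pos hd]
      have hcast : ((n : Int) + 1) = ((n + 1 : Nat) : Int) := by push_cast; ring
      rw [hcast, ih (n + 1)]
      simp only [pvMerge, hd, if_true, PySem.List.pyGet?_natCast,
        ← List.head?_drop, ← List.tail_drop]
      simp
    · rw [List.foldl_cons, if_neg hd]
      rw [ih n]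
      have hd' : ¬ PySem.Chars.strIsdigit s.toList = true := by simpa using hd
      simp [pvMerge, hd']

/-- Inserting an element whose key is strictly below every key in `acc` puts it at the head. -/
lemma pvInsMin (key : String → Int) (m : String) (acc : List String)
    (h : ∀ a ∈ acc, key m < key a) :
    PySem.List.insertBy (fun a b => decide (key a < key b)) m acc = m :: acc := by
  cases acc with
  | nil => simp [PySem.List.insertBy]
  | cons a acc => simp [PySem.List.insertBy, h a (by simp)]

/-- Elements whose keys are not below `key m` are inserted past a head `m`. -/
lemma pvFoldInsHead (key : String → Int) (ys : List String) :
    ∀ (acc : List String) (m : String), (∀ z ∈ ys, ¬ key z < key m) →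
    ys.foldl (fun acc x => PySem.List.insertBy (fun a b => decide (key a < key b)) x acc) (m :: acc)
      = m :: ys.foldl (fun acc x => PySem.List.insertBy (fun a b => decide (key a < key b)) x acc) acc := by
  induction ys with
  | nil => intro acc m _; rfl
  | cons z ys ih =>
    intro acc m h
    have hz : ¬ key z < key m := h z (by simp)
    simp only [List.foldl_cons, PySem.List.insertBy, hz]
    simp only [decide_eq_true_eq]
    exact ih _ m (fun w hw => h w (by simp [hw]))

/-- One step of Python's running-min: fold the first two elements into their first-min. -/
lemma pvMin?_cons2 (key : String → Int) (y z : String) (ys : List String) :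
    PySem.List.min? (y :: z :: ys) key
      = PySem.List.min? ((if key z < key y then z else y) :: ys) key := by
  by_cases h : key z < key y <;> simp [PySem.List.min?, h]

/-- `min?` on a cons, characterised through `min?` of the tail (keep-first tie rule). -/
lemma pvMin?_cons_eq (key : String → Int) (ys : List String) :
    ∀ (y : String), PySem.List.min? (y :: ys) key
      = some (match PySem.List.min? ys key with
              | none => y
              | some m' => if key m' < key y then m' else y) := by
  induction ys with
  | nil => intro y; simp [PySem.List.min?]
  | cons z ys ih =>
    intro y
    rw [pvMin?_cons2, ih (if key z < key y then z else y), ih z]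
    cases hm : PySem.List.min? ys key with
    | none => rfl
    | some m' =>
      simp only []
      congr 1
      split_ifs <;> first | rfl | omega

/-- Selection step of stable insertion sort: the first minimal element heads the result,
    and the rest is the fold over the list with that occurrence erased. -/
lemma pvSelG (key : String → Int) (l : List String) :
    ∀ (acc : List String) (m : String), PySem.List.min? l key = some m →
      (∀ a ∈ acc, key m < key a) →
      l.foldl (fun acc x => PySem.List.insertBy (fun a b => decide (key a < key b)) x acc) acc
        = m :: (l.erase m).foldl (fun acc x => PySem.List.insertBy (fun a b => decide (key a < key b)) x acc) acc := by
  induction l with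
  | nil => intro acc m h _; simp [PySem.List.min?] at h
  | cons y ys ih =>
    intro acc m h hacc
    rw [pvMin?_cons_eq key ys y] at h
    injection h with h
    cases hm : PySem.List.min? ys key with
    | none =>
      obtain rfl : ys = [] := (PySem.List.min?_eq_none_iff ys key).1 hm
      rw [hm] at h
      simp only [] at h
      subst h
      simp only [List.foldl_cons, List.erase_cons_head, List.foldl_nil]
      exact pvInsMin key y acc hacc
    | some m'' =>
      rw [hm] at h
      simp only [] at h
      by_cases hlt : key m'' < key y
      · rw [if_pos hlt] at h
        subst h
        have hne : ¬ (y == m'') = true := by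
          have hne' : y ≠ m'' := fun e => absurd (congrArg key e) (by omega)
          simpa using hne'
        rw [List.erase_cons_tail hne]
        simp only [List.foldl_cons]
        refine ih _ m'' hm (fun a ha => ?_)
        rcases (PySem.List.mem_insertBy _ _ _ _).1 ha with rfl | ha'
        · exact hlt
        · exact hacc a ha'
      · rw [if_neg hlt] at h
        subst h
        simp only [List.foldl_cons, List.erase_cons_head]
        rw [pvInsMin key y acc hacc]
        refine pvFoldInsHead key ys acc y (fun z hz => ?_)
        have h1 := PySem.List.min?_isMin hm z hz
        omega

/-- The first minimal element heads the stable sort; removing it commutes with sorting. -/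
lemma pvSortedMinCons (key : String → Int) (l : List String) (m : String)
    (h : PySem.List.min? l key = some m) :
    PySem.List.sorted l key false = m :: PySem.List.sorted (l.erase m) key false := by
  rw [PySem.List.sorted_eq_foldl_insertBy, PySem.List.sorted_eq_foldl_insertBy]
  exact pvSelG key l [] m h (by simp)

/-- B's selection loop, run from any pool large enough, emits `pvMerge` of the sorted pool. -/
lemma pvFoldB (ss : List String) :
    ∀ (pool acc : List String),
      ss.countP (fun s => PySem.Str.strIsdigit s) ≤ pool.length →
      (ss.foldl (fun st s =>
          if PySem.Str.strIsdigit s then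
            match PySem.List.min? st.2 (fun t => (PySem.Int.ofStr? t).getD 0) with
            | some m => (st.1 ++ [m], (PySem.List.remove? st.2 m).getD st.2)
            | none => (st.1 ++ [s], st.2)
          else
            (st.1 ++ [s], st.2)) (acc, pool)).1
        = acc ++ pvMerge ss (PySem.List.sorted pool (fun t => (PySem.Int.ofStr? t).getD 0) false) := by
  induction ss with
  | nil => intro pool acc _; simp [pvMerge]
  | cons s ss ih =>
    intro pool acc hlen
    rw [List.countP_cons] at hlen
    by_cases hd : PySem.Str.strIsdigit s
    · rw [if_pos hd] at hlen
      have hpool : pool ≠ [] := by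
        intro e; subst e; simp only [List.length_nil] at hlen; omega
      obtain ⟨m, hm⟩ : ∃ m, PySem.List.min? pool (fun t => (PySem.Int.ofStr? t).getD 0) = some m := by
        cases he : PySem.List.min? pool (fun t => (PySem.Int.ofStr? t).getD 0) with
        | none => exact absurd ((PySem.List.min?_eq_none_iff _ _).1 he) hpool
        | some m => exact ⟨m, rfl⟩
      have hmem : m ∈ pool := PySem.List.min?_mem hm
      have hrem : PySem.List.remove? pool m = some (pool.erase m) :=
        PySem.List.remove?_eq_some_erase pool m hmem
      rw [List.foldl_cons]
      simp only [hd, if_true, hm, hrem, Option.getD_some]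
      have hlen' : ss.countP (fun s => PySem.Str.strIsdigit s) ≤ (pool.erase m).length := by
        have := List.length_erase_of_mem hmem
        omega
      rw [ih (pool.erase m) (acc ++ [m]) hlen']
      rw [pvSortedMinCons _ pool m hm]
      have hd2 : PySem.Chars.strIsdigit s.toList = true := by simpa using hd
      simp [pvMerge, hd2]
    · rw [if_neg hd] at hlen
      rw [List.foldl_cons, if_neg hd, ih pool (acc ++ [s]) (by omega)]
      have hd' : ¬ PySem.Chars.strIsdigit s.toList = true := by simpa using hd
      simp [pvMerge, hd']

-- ===== VERDICT (by name: the statement is the Claim_ definition above) =====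
theorem sort_strings_spec : Claim_equal_sort_strings := by
  intro strings _
  unfold Spec_sort_strings sort_strings sort_strings_alt
  simp only []
  set ns := PySem.List.sorted (strings.filter (fun s => PySem.Str.strIsdigit s))
      (fun s => (PySem.Int.ofStr? s).getD 0) with hns
  have hA := pvFoldA ns strings 0 []
  have hB := pvFoldB strings (strings.filter (fun s => PySem.Str.strIsdigit s)) []
    (by rw [← List.countP_eq_length_filter])
  simp only [Nat.cast_zero, List.drop_zero, List.nil_append] at hA hB
  rw [hA, hB]
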